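-- pv_equiv track=rewrite | github.com/DomiDre/periodictable | code_generation_from_python/create_element_files.py | insert_underscores
-- ===== SOURCE A (Python) =====
-- def insert_underscores(num: str) -> str:
--     """Given a number, insert underscore every 3 digit after decimal dot
--     """
--     # add underscore before .
--     if "." in num:
--         idx = num.index(".")-3
--     else:
--         idx = len(num) - 3
--     while idx > 0:
--         num = num[:idx] + "_" +num[idx:]
--         idx -= 3
--
--     # add underscores after .
--     if not "." in num:
--         return num
--     idx = num.index('.') + 4
--     if "e" in num:
--         e_idx = len(num) - num.index('e')
--     else:
--         e_idx = 0
--     while idx < len(num) - e_idx: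
--         num = num[:idx] + "_" +num[idx:]
--         idx += 3+1
--     return num
-- ===== SOURCE B (Python) =====
-- def _group_rev(s: str) -> str:
--     """Group s in 3-char chunks from the right, joined by underscores."""
--     r = s[::-1]
--     chunks = [r[i:i+3] for i in range(0, len(r), 3)]
--     return "_".join(chunks)[::-1]
--
--
-- def insert_underscores(num: str) -> str:
--     intpart, dot, rest = num.partition(".")
--     grouped_int = _group_rev(intpart)
--     if not dot:
--         return grouped_int
--     head, e, tail = rest.partition("e")
--     chunks = [head[i:i+3] for i in range(0, len(head), 3)]
--     return grouped_int + "." + "_".join(chunks) + e + tail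
-- ===== Notes on version B (the rewrite author's own statement) =====
-- stated objective: faster
-- what changed: Replaces A's loops of repeated whole-string re-slicing (one underscore inserted per O(n) rebuild) by a single partition-then-chunk pass: split on the first dot, group the integer part by reverse/3-chunk/join/reverse, split off the exponent at the first exponent marker and join the fractional digits in left-to-right 3-chunks; Pre_ excludes malformed strings with an exponent marker before the first dot and more than 3 characters between the dot and the next exponent marker, where no behaviour is specified: A leaves that span ungrouped, B groups it, either is defensible.
-- outside the precondition, e.g. on insert_underscores('1e2.3456'): A returns '1e2.3456', B returns '1e2.345_6'
import Mathlib
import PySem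

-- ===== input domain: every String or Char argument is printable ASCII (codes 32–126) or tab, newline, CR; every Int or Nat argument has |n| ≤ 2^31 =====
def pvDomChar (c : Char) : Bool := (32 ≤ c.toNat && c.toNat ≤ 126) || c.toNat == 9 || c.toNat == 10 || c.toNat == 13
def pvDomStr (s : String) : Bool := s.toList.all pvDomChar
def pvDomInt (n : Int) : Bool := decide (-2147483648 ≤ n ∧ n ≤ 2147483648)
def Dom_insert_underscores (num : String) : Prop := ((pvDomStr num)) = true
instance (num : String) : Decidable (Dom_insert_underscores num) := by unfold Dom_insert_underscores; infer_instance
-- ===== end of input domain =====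

-- B groups digits by partition / reverse-chunk-join instead of A's repeated in-place
-- insertions (one O(n) rebuild per underscore); objective: asymptotically faster single pass.

-- ===== PORT A =====
-- num[:idx] + "_" + num[idx:]
def aIns (num : List Char) (idx : Int) : List Char :=
  PySem.List.slice num none (some idx) ++ ['_'] ++ PySem.List.slice num (some idx) none

theorem aIns_length (num : List Char) (idx : Int) : (aIns num idx).length = num.length + 1 := by
  simp [aIns, PySem.List.slice, PySem.List.clampIdx]
  omega

-- while idx > 0: num = num[:idx] + "_" + num[idx:]; idx -= 3
def aLoop1 (num : List Char) (idx : Int) : List Char :=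
  if 0 < idx then aLoop1 (aIns num idx) (idx - 3) else num
termination_by idx.toNat
decreasing_by omega

-- while idx < len(num) - e_idx: num = num[:idx] + "_" + num[idx:]; idx += 3+1
def aLoop2 (num : List Char) (idx e_idx : Int) : List Char :=
  if idx < (num.length : Int) - e_idx then aLoop2 (aIns num idx) (idx + 4) e_idx else num
termination_by ((num.length : Int) - e_idx - idx).toNat
decreasing_by simp only [aIns_length]; omega

def insert_underscores (num : String) : String :=
  let n := num.toList
  -- idx = num.index(".") - 3 if "." in num else len(num) - 3   (.getD 0 unreachable: guarded by membership)
  let idx : Int := if '.' ∈ n then ((PySem.List.index? n '.').getD 0 : Int) - 3 else (n.length : Int) - 3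
  let n1 := aLoop1 n idx
  if '.' ∉ n1 then String.ofList n1
  else
    let idx2 : Int := ((PySem.List.index? n1 '.').getD 0 : Int) + 4
    let e_idx : Int := if 'e' ∈ n1 then (n1.length : Int) - ((PySem.List.index? n1 'e').getD 0 : Int) else 0
    String.ofList (aLoop2 n1 idx2 e_idx)

-- ===== PORT B =====
-- s.partition(c) for a single-character separator (flag true iff c was found)
def pyPartitionChar (s : List Char) (c : Char) : List Char × Bool × List Char :=
  match PySem.List.index? s c with
  | some i => (s.take i, true, s.drop (i + 1))
  | none => (s, false, [])

-- [r[i:i+3] for i in range(0, len(r), 3)]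
def chunksB (r : List Char) : List (List Char) :=
  (PySem.List.pyRange 0 (r.length : Int) 3).map
    (fun i => PySem.List.slice r (some i) (some (i + 3)))

-- "_".join([r[i:i+3] for i in range(0, len(r), 3)])[::-1] with r = s[::-1]
def groupRevB (s : List Char) : List Char :=
  let r := s.reverse
  (PySem.Chars.join ['_'] (chunksB r)).reverse

def insert_underscores_alt (num : String) : String :=
  let p := pyPartitionChar num.toList '.'
  let intpart := p.1
  let dot := p.2.1
  let rest := p.2.2
  let grouped_int := groupRevB intpart
  if !dot then String.ofList grouped_int
  else
    let q := pyPartitionChar rest 'e'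
    String.ofList (grouped_int ++ '.' ::
      (PySem.Chars.join ['_'] (chunksB q.1) ++ (if q.2.1 then ['e'] else []) ++ q.2.2))

-- ===== PRECONDITION & SPEC =====
-- Pre_ excludes malformed strings with an exponent marker before the first decimal point and
-- more than 3 characters between that point and the next exponent marker (or the end): no number
-- has an exponent marker before its decimal point, A leaves that span ungrouped while B groups
-- it, and on such non-numeric input either value is defensible.
def Pre_insert_underscores (num : String) : Prop :=
  'e' ∈ num.toList.takeWhile (fun c => c ≠ '.') →
    (((num.toList.dropWhile (fun c => c ≠ '.')).drop 1).takeWhile (fun c => c ≠ 'e')).length ≤ 3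
instance (num : String) : Decidable (Pre_insert_underscores num) := by unfold Pre_insert_underscores; infer_instance
def pvWitness_insert_underscores : String := "12345.678901e-5"

def Spec_insert_underscores (num : String) (out : String) : Prop := out = insert_underscores_alt num
instance (num : String) (out : String) : Decidable (Spec_insert_underscores num out) := by unfold Spec_insert_underscores; infer_instance

-- ===== CLAIM (what is proved, stated in full; the proofs are below) =====
def Claim_equal_insert_underscores : Prop := ∀ (num : String), Dom_insert_underscores num → Pre_insert_underscores num → Spec_insert_underscores num (insert_underscores num)

-- ===== LEMMAS AND PROOFS =====

-- proof-side recursive chunking, and the '_'-join of it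
def chunk3 (l : List Char) : List (List Char) :=
  if l = [] then [] else l.take 3 :: chunk3 (l.drop 3)
termination_by l.length
decreasing_by rename_i h; cases l with | nil => exact absurd rfl h | cons a t => simp

def ljoin (l : List Char) : List Char := PySem.Chars.join ['_'] (chunk3 l)

theorem chunk3_nil : chunk3 [] = [] := by rw [chunk3]; simp

theorem chunk3_cons (l : List Char) (h : l ≠ []) :
    chunk3 l = l.take 3 :: chunk3 (l.drop 3) := by
  rw [chunk3]; simp [h]

theorem ljoin_nil : ljoin ([] : List Char) = [] := by
  rw [ljoin, chunk3_nil, PySem.Chars.join_nil]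

theorem ljoin_short (l : List Char) (h : l.length ≤ 3) : ljoin l = l := by
  rcases eq_or_ne l [] with rfl | hne
  · exact ljoin_nil
  · rw [ljoin, chunk3_cons l hne, List.drop_eq_nil_of_le h, chunk3_nil,
      PySem.Chars.join_singleton, List.take_of_length_le h]

theorem ljoin_long (l : List Char) (h : 3 < l.length) :
    ljoin l = l.take 3 ++ '_' :: ljoin (l.drop 3) := by
  have hne : l ≠ [] := by intro hh; subst hh; simp at h
  have hd : l.drop 3 ≠ [] := by
    intro hh
    have := congrArg List.length hh
    simp at this; omega
  rw [ljoin, chunk3_cons l hne, chunk3_cons _ hd, PySem.Chars.join_cons_cons,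
    ← chunk3_cons _ hd, ← ljoin]
  simp

theorem pyRange_three (m : ℕ) :
    PySem.List.pyRange 0 (m : Int) 3 = (List.range ((m+2)/3)).map (fun k => ((3*k : ℕ) : Int)) := by
  simp only [PySem.List.pyRange]
  norm_num
  have hcount : (if 0 < m then (((m:Int) + 3 - 1) / 3).toNat else 0) = (m+2)/3 := by
    split_ifs with h <;> omega
  rw [hcount]

theorem chunk3_eq_range (l : List Char) :
    (List.range ((l.length+2)/3)).map (fun k => (l.drop (3*k)).take 3) = chunk3 l := by
  induction hn : l.length using Nat.strong_induction_on generalizing l with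
  | _ n ih =>
    rcases eq_or_ne l [] with rfl | hne
    · simp at hn; subst hn; simp [chunk3_nil]
    · have hpos : 0 < l.length := List.length_pos_iff.mpr hne
      have hc : (l.length + 2)/3 = ((l.drop 3).length + 2)/3 + 1 := by simp; omega
      subst hn
      rw [chunk3_cons l hne, hc, List.range_succ_eq_map, List.map_cons]
      simp only [Nat.mul_zero, List.drop_zero, List.map_map]
      congr 1
      have hfun : ((fun k => (l.drop (3*k)).take 3) ∘ Nat.succ)
          = fun k => ((l.drop 3).drop (3*k)).take 3 := by
        funext k
        simp [Function.comp, List.drop_drop]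
        ring_nf
      rw [hfun]
      exact ih ((l.drop 3).length) (by simp; omega) _ rfl

theorem chunksB_eq_chunk3 (l : List Char) : chunksB l = chunk3 l := by
  rw [chunksB, pyRange_three, List.map_map, ← chunk3_eq_range]
  apply List.map_congr_left
  intro k _
  have h3 : ((3*k : ℕ) : Int) + 3 = ((3*k : ℕ) : Int) + ((3 : ℕ) : Int) := by norm_num
  simp only [Function.comp, h3, PySem.List.slice_natCast_add]

theorem mem_of_mem_ljoin {c : Char} {l : List Char} (h : c ∈ ljoin l) : c ∈ l ∨ c = '_' := by
  induction hn : l.length using Nat.strong_induction_on generalizing l with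
  | _ n ih =>
    by_cases hlen : l.length ≤ 3
    · rw [ljoin_short l hlen] at h; exact Or.inl h
    · rw [ljoin_long l (by omega)] at h
      rcases List.mem_append.mp h with h1 | h2
      · exact Or.inl (List.mem_of_mem_take h1)
      · rcases List.mem_cons.mp h2 with h3 | h4
        · exact Or.inr h3
        · subst hn
          rcases ih ((l.drop 3).length) (by simp; omega) h4 rfl with h5 | h5
          · exact Or.inl (List.mem_of_mem_drop h5)
          · exact Or.inr h5

theorem groupRevB_eq (s : List Char) : groupRevB s = (ljoin s.reverse).reverse := by
  simp [groupRevB, ljoin, chunksB_eq_chunk3]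

theorem aIns_eq (num : List Char) (idx : Int) (h : 0 ≤ idx) :
    aIns num idx = num.take idx.toNat ++ '_' :: num.drop idx.toNat := by
  rw [aIns, PySem.List.slice_to num h, PySem.List.slice_from num h]
  simp

theorem aLoop1_append : ∀ (n : ℕ) (idx : Int), idx.toNat = n →
    ∀ (x y : List Char), idx ≤ (x.length : Int) →
    aLoop1 (x ++ y) idx = aLoop1 x idx ++ y := by
  intro n
  induction n using Nat.strong_induction_on with
  | _ n ih =>
    intro idx hn x y h
    by_cases h0 : 0 < idx
    · conv_lhs => rw [aLoop1]
      conv_rhs => rw [aLoop1]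
      rw [if_pos h0, if_pos h0]
      have hle : idx.toNat ≤ x.length := by omega
      have hins : aIns (x ++ y) idx = aIns x idx ++ y := by
        rw [aIns_eq _ _ (le_of_lt h0), aIns_eq _ _ (le_of_lt h0),
          List.take_append_of_le_length hle, List.drop_append_of_le_length hle]
        simp
      rw [hins]
      exact ih (idx - 3).toNat (by omega) _ rfl _ y
        (by rw [aIns_length]; push_cast; omega)
    · conv_lhs => rw [aLoop1]
      conv_rhs => rw [aLoop1]
      rw [if_neg h0, if_neg h0]

theorem aLoop1_eq_ljoin : ∀ (n : ℕ) (l : List Char), l.length = n →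
    aLoop1 l ((l.length : Int) - 3) = (ljoin l.reverse).reverse := by
  intro n
  induction n using Nat.strong_induction_on with
  | _ n ih =>
    intro l hn
    by_cases hlen : l.length ≤ 3
    · rw [aLoop1, if_neg (by omega),
        ljoin_short l.reverse (by simp; omega), List.reverse_reverse]
    · have h3 : 3 < l.length := by omega
      have h0 : (0:Int) < (l.length : Int) - 3 := by omega
      rw [aLoop1, if_pos h0]
      set x := l.take (l.length - 3) with hxdef
      set d := l.drop (l.length - 3) with hddef
      have hxlen : x.length = l.length - 3 := by simp [hxdef]
      have hdlen : d.length = 3 := by simp [hddef]; omega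
      have htn : ((l.length : Int) - 3).toNat = l.length - 3 := by omega
      have hins : aIns l ((l.length : Int) - 3) = x ++ ('_' :: d) := by
        rw [aIns_eq _ _ (le_of_lt h0), htn]
      rw [hins]
      have hidx : (l.length : Int) - 3 - 3 = (x.length : Int) - 3 := by
        rw [hxlen]; omega
      rw [hidx, aLoop1_append ((x.length : Int) - 3).toNat _ rfl x ('_' :: d) (by omega),
        ih x.length (by omega) x rfl]
      have hl : l = x ++ d := (List.take_append_drop _ l).symm
      conv_rhs => rw [hl]
      rw [List.reverse_append,
        ljoin_long (d.reverse ++ x.reverse) (by simp [hdlen]; omega),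
        List.take_left' (by simp [hdlen]), List.drop_left' (by simp [hdlen])]
      simp

theorem aLoop2_eq_ljoin (T : List Char) : ∀ (n : ℕ) (H : List Char), H.length = n →
    ∀ (P : List Char),
    aLoop2 (P ++ H ++ T) ((P.length : Int) + 3) (T.length : Int) = P ++ ljoin H ++ T := by
  intro n
  induction n using Nat.strong_induction_on with
  | _ n ih =>
    intro H hn P
    by_cases hlen : H.length ≤ 3
    · rw [aLoop2, if_neg (by simp; omega), ljoin_short H hlen]
    · have h3 : 3 < H.length := by omega
      rw [aLoop2, if_pos (by simp; omega)]
      have h0 : (0:Int) ≤ (P.length : Int) + 3 := by positivity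
      have htn : ((P.length : Int) + 3).toNat = P.length + 3 := by omega
      have hins : aIns (P ++ H ++ T) ((P.length : Int) + 3)
          = (P ++ H.take 3 ++ ['_']) ++ H.drop 3 ++ T := by
        rw [aIns_eq _ _ h0, htn]
        have h1 : (P ++ H ++ T).take (P.length + 3) = P ++ H.take 3 := by
          rw [List.append_assoc, List.take_append, List.take_append_of_le_length (by omega)]
          congr 1
          · exact List.take_of_length_le (by omega)
          · congr 1; omega
        have h2 : (P ++ H ++ T).drop (P.length + 3) = H.drop 3 ++ T := by
          rw [List.append_assoc, List.drop_append, List.drop_append_of_le_length (by omega)]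
          have : P.drop (P.length + 3) = [] := List.drop_eq_nil_of_le (by omega)
          simp [this]
        rw [h1, h2]
        simp
      rw [hins]
      have hplen : (P.length : Int) + 3 + 4 = (((P ++ H.take 3 ++ ['_']).length : Int)) + 3 := by
        simp; omega
      rw [hplen, ih (H.drop 3).length (by simp; omega) _ rfl]
      rw [ljoin_long H h3]
      simp

theorem ne_dot_underscore : ('.' : Char) ≠ '_' := by decide
theorem ne_e_underscore : ('e' : Char) ≠ '_' := by decide
theorem ne_e_dot : ('e' : Char) ≠ '.' := by decide

theorem not_mem_groupRev {c : Char} {l : List Char} (hc : c ∉ l) (hu : c ≠ '_') :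
    c ∉ (ljoin l.reverse).reverse := by
  intro h
  rcases mem_of_mem_ljoin (List.mem_reverse.mp h) with h1 | h1
  · exact hc (List.mem_reverse.mp h1)
  · exact hu h1

theorem takeWhile_prefix_ne (c : Char) (pre suf : List Char) (hpre : c ∉ pre) :
    (pre ++ c :: suf).takeWhile (fun x => x ≠ c) = pre := by
  induction pre with
  | nil => simp
  | cons a t ih =>
    have ha : a ≠ c := fun h => hpre (h ▸ List.mem_cons_self)
    simpa [List.takeWhile_cons, ha] using ih (fun h => hpre (List.mem_cons_of_mem _ h))

theorem dropWhile_prefix_ne (c : Char) (pre suf : List Char) (hpre : c ∉ pre) :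
    (pre ++ c :: suf).dropWhile (fun x => x ≠ c) = c :: suf := by
  induction pre with
  | nil => simp
  | cons a t ih =>
    have ha : a ≠ c := fun h => hpre (h ▸ List.mem_cons_self)
    simpa [List.dropWhile_cons, ha] using ih (fun h => hpre (List.mem_cons_of_mem _ h))

theorem takeWhile_all_ne (c : Char) (l : List Char) (h : c ∉ l) :
    l.takeWhile (fun x => x ≠ c) = l := by
  induction l with
  | nil => rfl
  | cons a t ih =>
    have ha : a ≠ c := fun hh => h (hh ▸ List.mem_cons_self)
    simpa [List.takeWhile_cons, ha] using ih (fun hh => h (List.mem_cons_of_mem _ hh))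

theorem mem_ljoin_of_mem {c : Char} {l : List Char} (h : c ∈ l) : c ∈ ljoin l := by
  induction hn : l.length using Nat.strong_induction_on generalizing l with
  | _ n ih =>
    by_cases hlen : l.length ≤ 3
    · rw [ljoin_short l hlen]; exact h
    · rw [ljoin_long l (by omega)]
      rcases List.mem_append.mp ((List.take_append_drop 3 l) ▸ h) with h1 | h2
      · exact List.mem_append.mpr (Or.inl h1)
      · subst hn
        exact List.mem_append.mpr (Or.inr (List.mem_cons_of_mem _
          (ih ((l.drop 3).length) (by simp; omega) h2 rfl)))

theorem mem_groupRev {c : Char} {l : List Char} (hc : c ∈ l) :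
    c ∈ (ljoin l.reverse).reverse :=
  List.mem_reverse.mpr (mem_ljoin_of_mem (List.mem_reverse.mpr hc))

-- ===== VERDICT (by name: the statement is the Claim_ definition above) =====
theorem insert_underscores_spec : Claim_equal_insert_underscores := by
  intro num _ hPre
  unfold Spec_insert_underscores insert_underscores insert_underscores_alt
  by_cases hdot : '.' ∈ num.toList
  · -- "." in num
    obtain ⟨k, hk⟩ := Option.isSome_iff_exists.mp
      ((PySem.List.index?_isSome_iff num.toList '.').mpr hdot)
    obtain ⟨pre, suf, hsplit, hklen, hpre⟩ :=
      (PySem.List.index?_eq_some_iff num.toList '.' k).mp hk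
    have hPre' : 'e' ∈ pre → (suf.takeWhile (fun x => x ≠ 'e')).length ≤ 3 := by
      intro hh
      have := hPre (by rw [hsplit, takeWhile_prefix_ne '.' pre suf hpre]; exact hh)
      rwa [hsplit, dropWhile_prefix_ne '.' pre suf hpre, List.drop_one, List.tail_cons] at this
    set G := (ljoin pre.reverse).reverse with hG
    have h1 : aLoop1 num.toList (((k:ℕ) : Int) - 3) = G ++ '.' :: suf := by
      rw [hsplit, aLoop1_append ((k : Int) - 3).toNat _ rfl pre ('.' :: suf) (by omega),
        show ((k:ℕ) : Int) - 3 = ((pre.length : ℕ) : Int) - 3 by rw [hklen],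
        aLoop1_eq_ljoin pre.length pre rfl]
    have hGdot : '.' ∉ G := not_mem_groupRev hpre ne_dot_underscore
    have hdot1 : '.' ∈ G ++ '.' :: suf := by simp
    have hidx1 : PySem.List.index? (G ++ '.' :: suf) '.' = some G.length :=
      (PySem.List.index?_eq_some_iff _ '.' G.length).mpr ⟨G, suf, rfl, rfl, hGdot⟩
    -- B side partition of num.toList
    have htake : num.toList.take k = pre := by
      rw [hsplit, ← hklen, List.take_left]
    have hdrop : num.toList.drop (k + 1) = suf := by
      rw [hsplit, show pre ++ '.' :: suf = (pre ++ ['.']) ++ suf by simp,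
        show k + 1 = (pre ++ ['.']).length by simp [hklen], List.drop_left]
    simp only [if_pos hdot, hk, Option.getD_some, h1, if_neg (by simp [hdot1] : ¬ '.' ∉ G ++ '.' :: suf),
      hidx1, pyPartitionChar, htake, hdrop, Bool.not_true, if_neg (by decide : ¬ (false = true))]
    by_cases he : 'e' ∈ pre
    · -- malformed but short fractional head: A's second loop never runs, B's grouping is identity
      have heG : 'e' ∈ G := mem_groupRev he
      have he1 : 'e' ∈ G ++ '.' :: suf := List.mem_append.mpr (Or.inl heG)
      obtain ⟨j, hj⟩ := Option.isSome_iff_exists.mp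
        ((PySem.List.index?_isSome_iff G 'e').mpr heG)
      obtain ⟨hjlt, -, -⟩ := PySem.List.getElem_of_index?_eq_some hj
      have hidxe : PySem.List.index? (G ++ '.' :: suf) 'e' = some j := by
        rw [PySem.List.index?_append_of_mem _ heG, hj]
      have hstop : aLoop2 (G ++ '.' :: suf) ((G.length : Int) + 4)
          (((G ++ '.' :: suf).length : Int) - (j : Int)) = G ++ '.' :: suf := by
        rw [aLoop2, if_neg (by omega)]
      have hlen3 := hPre' he
      simp only [if_pos he1, hidxe, Option.getD_some, hstop, groupRevB_eq, ← hG]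
      by_cases hes : 'e' ∈ suf
      · obtain ⟨m, hm⟩ := Option.isSome_iff_exists.mp
          ((PySem.List.index?_isSome_iff suf 'e').mpr hes)
        obtain ⟨H, T, hsufsplit, hmlen, hH⟩ :=
          (PySem.List.index?_eq_some_iff suf 'e' m).mp hm
        have hHtw : suf.takeWhile (fun x => x ≠ 'e') = H := by
          rw [hsufsplit, takeWhile_prefix_ne 'e' H T hH]
        have hH3 : H.length ≤ 3 := by rw [hHtw] at hlen3; exact hlen3
        have htake2 : suf.take m = H := by rw [hsufsplit, ← hmlen, List.take_left]
        have hdrop2 : suf.drop (m + 1) = T := by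
          rw [hsufsplit, show H ++ 'e' :: T = (H ++ ['e']) ++ T by simp,
            show m + 1 = (H ++ ['e']).length by simp [hmlen], List.drop_left]
        have hjH : PySem.Chars.join ['_'] (chunk3 H) = H := ljoin_short H hH3
        simp only [hm, htake2, hdrop2, chunksB_eq_chunk3, hjH]
        simp [hsufsplit]
      · have hesnone : PySem.List.index? suf 'e' = none :=
          (PySem.List.index?_eq_none_iff suf 'e').mpr hes
        have hsuf3 : suf.length ≤ 3 := by
          rwa [takeWhile_all_ne 'e' suf hes] at hlen3
        have hjS : PySem.Chars.join ['_'] (chunk3 suf) = suf := ljoin_short suf hsuf3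
        simp only [hesnone, chunksB_eq_chunk3, hjS,
          if_neg (by decide : ¬ (false = true))]
        simp
    have heG : 'e' ∉ G := not_mem_groupRev he ne_e_underscore
    simp only [groupRevB_eq, ← hG]
    by_cases hes : 'e' ∈ suf
    · -- "e" after "."
      obtain ⟨m, hm⟩ := Option.isSome_iff_exists.mp
        ((PySem.List.index?_isSome_iff suf 'e').mpr hes)
      obtain ⟨H, T, hsufsplit, hmlen, hH⟩ :=
        (PySem.List.index?_eq_some_iff suf 'e' m).mp hm
      have he1 : 'e' ∈ G ++ '.' :: suf := by simp [hes]
      have hidxe : PySem.List.index? (G ++ '.' :: suf) 'e' = some (G.length + 1 + H.length) := by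
        refine (PySem.List.index?_eq_some_iff _ 'e' _).mpr ⟨G ++ '.' :: H, T, ?_, by simp; omega, ?_⟩
        · rw [hsufsplit]; simp
        · simp [heG, hH, ne_e_dot]
      have hlen1 : (G ++ '.' :: suf).length = G.length + 1 + H.length + 1 + T.length := by
        rw [hsufsplit]; simp; omega
      have hrun : aLoop2 (G ++ '.' :: suf) ((G.length : Int) + 4)
          (((G ++ '.' :: suf).length : Int) - ((G.length + 1 + H.length : ℕ) : Int))
          = (G ++ ['.']) ++ ljoin H ++ 'e' :: T := by
        rw [show (((G ++ '.' :: suf).length : ℕ) : Int) - ((G.length + 1 + H.length : ℕ) : Int)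
            = ((('e' :: T).length : ℕ) : Int) by rw [hlen1]; push_cast; simp; omega,
          hsufsplit,
          show G ++ '.' :: (H ++ 'e' :: T) = (G ++ ['.']) ++ H ++ 'e' :: T by simp,
          show ((G.length : Int) + 4) = (((G ++ ['.']).length : ℕ) : Int) + 3 by simp; omega,
          aLoop2_eq_ljoin ('e' :: T) H.length H rfl (G ++ ['.'])]
      -- B partition of suf at 'e'
      have htake2 : suf.take m = H := by rw [hsufsplit, ← hmlen, List.take_left]
      have hdrop2 : suf.drop (m + 1) = T := by
        rw [hsufsplit, show H ++ 'e' :: T = (H ++ ['e']) ++ T by simp,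
          show m + 1 = (H ++ ['e']).length by simp [hmlen], List.drop_left]
      simp only [if_pos he1, hidxe, Option.getD_some, hrun, hm,
        htake2, hdrop2, chunksB_eq_chunk3]
      simp [ljoin]
    · -- no "e" at all
      have he1 : 'e' ∉ G ++ '.' :: suf := by simp [heG, hes, ne_e_dot]
      have hrun : aLoop2 (G ++ '.' :: suf) ((G.length : Int) + 4) (0 : Int)
          = (G ++ ['.']) ++ ljoin suf ++ [] := by
        rw [show G ++ '.' :: suf = (G ++ ['.']) ++ suf ++ [] by simp,
          show ((G.length : Int) + 4) = (((G ++ ['.']).length : ℕ) : Int) + 3 by simp; omega,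
          show (0 : Int) = ((([] : List Char).length : ℕ) : Int) by simp,
          aLoop2_eq_ljoin [] suf.length suf rfl (G ++ ['.'])]
      have hesnone : PySem.List.index? suf 'e' = none :=
        (PySem.List.index?_eq_none_iff suf 'e').mpr hes
      simp only [if_neg he1, hrun, hesnone,
        if_neg (by decide : ¬ (false = true)), chunksB_eq_chunk3]
      simp [ljoin]
  · -- no "." in num
    have hidxnone : PySem.List.index? num.toList '.' = none :=
      (PySem.List.index?_eq_none_iff num.toList '.').mpr hdot
    have h1 : aLoop1 num.toList ((num.toList.length : Int) - 3)
        = (ljoin num.toList.reverse).reverse := aLoop1_eq_ljoin num.toList.length _ rfl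
    have hGdot : '.' ∉ (ljoin num.toList.reverse).reverse :=
      not_mem_groupRev hdot ne_dot_underscore
    simp only [if_neg hdot, h1, if_pos hGdot, pyPartitionChar, hidxnone,
      Bool.not_false, groupRevB_eq]
    simp
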